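-- pv_equiv track=rewrite | github.com/RowenFelt/Burrows-Wheeler-Alignment | rosalind9N/rosalind9N.py | build_count_matrix
-- ===== SOURCE A (Python) =====
-- def build_count_matrix(letters, last_column):
--     """ Build count matrix from last_column
--
--     Args:
--         letters: String of letters in index
--         last_column: Last column as string
--
--     Return:
--         Dictionary of count array indexed by symbol
--     """
--     count_matrix = {}
--     for letter in letters:
--         count_matrix[letter] = [0]
--     for current_letter in last_column:
--         for letter in letters:
--             letter_list = count_matrix[letter]
--             if letter == current_letter:
--                 letter_list.append(letter_list[-1] + 1)
--             else:
--                 letter_list.append(letter_list[-1])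
--     return count_matrix
-- ===== SOURCE B (Python) =====
-- def build_count_matrix(letters, last_column):
--     """Index occurrence positions per symbol in one pass, then build each count
--     column by run-length expansion between consecutive occurrences."""
--     n = len(last_column)
--     positions = {}
--     for i, ch in enumerate(last_column):
--         positions.setdefault(ch, []).append(i)
--     count_matrix = {}
--     for letter in letters:
--         ps = positions.get(letter, [])
--         col = []
--         prev = -1
--         for cnt, p in enumerate(ps):
--             col += [cnt] * (p - prev)
--             prev = p
--         col += [len(ps)] * (n - prev)
--         count_matrix[letter] = col
--     return count_matrix
-- ===== Notes on version B (the rewrite author's own statement) =====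
-- stated objective: alternative
-- what changed: B replaces the per-position list updates with a different algorithm: one pass indexes the occurrence positions of every symbol into a dict of position lists, then each letter's count column is built by run-length expansion ([k]*(gap) blocks between consecutive occurrences) instead of appending one element per position.
-- outside the precondition, e.g. on build_count_matrix('aa', 'a'): A returns {'a': [0, 1, 2]}, B returns {'a': [0, 1]}
import Mathlib
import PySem

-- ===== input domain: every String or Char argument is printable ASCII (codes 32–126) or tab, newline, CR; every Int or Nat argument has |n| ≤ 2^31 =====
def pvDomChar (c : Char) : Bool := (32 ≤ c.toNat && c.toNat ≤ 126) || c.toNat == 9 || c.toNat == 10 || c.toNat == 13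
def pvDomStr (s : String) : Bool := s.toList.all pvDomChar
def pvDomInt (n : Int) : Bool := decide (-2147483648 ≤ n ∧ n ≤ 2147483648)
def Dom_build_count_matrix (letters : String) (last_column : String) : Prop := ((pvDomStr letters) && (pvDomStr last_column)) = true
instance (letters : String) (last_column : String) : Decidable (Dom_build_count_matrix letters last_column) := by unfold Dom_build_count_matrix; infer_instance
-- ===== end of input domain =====

-- B uses a different algorithm: one pass indexes each symbol's occurrence positions,
-- then each letter's count column is built by run-length expansion between occurrences.

-- ===== PORT A =====
-- inner loop body of A; letter_list[-1] → pyGetD … (-1) 0: every list holds the initial 0,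
-- so the list is never empty and the default 0 is never used (Python never raises here)
def pvStepA (cur : Char) (d : PySem.Dict String (List Int)) (c : Char) : PySem.Dict String (List Int) :=
  let ll := d.getD c.toString []
  if c == cur then d.insert c.toString (ll ++ [PySem.List.pyGetD ll (-1) 0 + 1])
  else d.insert c.toString (ll ++ [PySem.List.pyGetD ll (-1) 0])

def build_count_matrix (letters : String) (last_column : String) : List (String × List Int) :=
  let init : PySem.Dict String (List Int) :=
    letters.toList.foldl (fun d c => d.insert c.toString [0]) PySem.Dict.empty
  (last_column.toList.foldl (fun d cur => letters.toList.foldl (pvStepA cur) d) init).items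

-- ===== PORT B =====
-- inner loop of Source B: `for cnt, p in enumerate(ps): col += [cnt]*(p-prev); prev = p`,
-- state (prev, col); [cnt]*(p-prev) → pyRepeat (Python list repetition, exact)
def pvExpandStep (st : Int × List Int) (q : Int × Int) : Int × List Int :=
  (q.2, st.2 ++ PySem.List.pyRepeat [q.1] (q.2 - st.1))

-- per-letter column of Source B: expansion loop from prev = -1, then the final
-- `col += [len(ps)]*(n-prev)` run
def pvColB (ps : List Int) (n : Int) : List Int :=
  let st := (PySem.List.enumerate ps).foldl pvExpandStep (-1, [])
  st.2 ++ PySem.List.pyRepeat [(ps.length : Int)] (n - st.1)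

def build_count_matrix_alt (letters : String) (last_column : String) : List (String × List Int) :=
  let n : Int := (last_column.toList.length : Int)
  -- positions.setdefault(ch, []).append(i)  ≡  positions[ch] = positions.get(ch, []) + [i]
  let positions : PySem.Dict Char (List Int) :=
    (PySem.List.enumerate last_column.toList).foldl
      (fun d p => d.modify p.2 [] (fun l => l ++ [p.1])) PySem.Dict.empty
  (letters.toList.foldl
      (fun cm c => cm.insert c.toString (pvColB (positions.getD c []) n))
      (PySem.Dict.empty : PySem.Dict String (List Int))).items

-- ===== PRECONDITION & SPEC =====
-- Pre_ excludes letters with duplicate characters: there A's inner loop visits the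
-- duplicated key several times per position (extra appends), an accidental duplicate-key
-- artefact of iterating letters rather than the dict's keys; B counts each letter once.
def Pre_build_count_matrix (letters : String) (last_column : String) : Prop :=
  letters.toList.Nodup
instance (letters : String) (last_column : String) : Decidable (Pre_build_count_matrix letters last_column) := by unfold Pre_build_count_matrix; infer_instance

def pvWitness_build_count_matrix : String × String := ("ab", "aba")

def Spec_build_count_matrix (letters : String) (last_column : String) (out : List (String × List Int)) : Prop := out = build_count_matrix_alt letters last_column
instance (letters : String) (last_column : String) (out : List (String × List Int)) : Decidable (Spec_build_count_matrix letters last_column out) := by unfold Spec_build_count_matrix; infer_instance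

-- ===== CLAIM (what is proved, stated in full; the proofs are below) =====
def Claim_equal_build_count_matrix : Prop := ∀ (letters : String) (last_column : String), Dom_build_count_matrix letters last_column → Pre_build_count_matrix letters last_column → Spec_build_count_matrix letters last_column (build_count_matrix letters last_column)

-- ===== LEMMAS AND PROOFS =====

theorem pvCharToString_inj {a b : Char} (h : a.toString = b.toString) : a = b := by
  have := congrArg String.toList h
  simpa using this

-- proof-side specification: the prefix-count column of letter c over t
def pvColStep (c : Char) (st : Int × List Int) (ch : Char) : Int × List Int :=
  (if ch == c then st.1 + 1 else st.1, st.2 ++ [if ch == c then st.1 + 1 else st.1])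

def pvCol (c : Char) (t : List Char) : List Int :=
  (t.foldl (pvColStep c) (0, [0])).2

theorem pvColInv (c : Char) (t : List Char) (st : Int × List Int)
    (h1 : st.2 ≠ []) (h2 : PySem.List.pyGetD st.2 (-1) 0 = st.1) :
    (t.foldl (pvColStep c) st).2 ≠ [] ∧
    PySem.List.pyGetD (t.foldl (pvColStep c) st).2 (-1) 0 = (t.foldl (pvColStep c) st).1 := by
  induction t generalizing st with
  | nil => exact ⟨h1, h2⟩
  | cons a t ih =>
    simp only [List.foldl_cons]
    exact ih _ (by simp [pvColStep]) (by simp [pvColStep, PySem.List.pyGetD_neg_one_append_singleton])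

theorem pvCol_append (c : Char) (t : List Char) (cur : Char) :
    pvCol c (t ++ [cur]) =
      pvCol c t ++ [PySem.List.pyGetD (pvCol c t) (-1) 0 + if c == cur then 1 else 0] := by
  have inv := pvColInv c t (0, [0]) (by simp) (by decide)
  unfold pvCol
  rw [List.foldl_append]
  simp only [List.foldl_cons, List.foldl_nil]
  rw [show ∀ st ch, pvColStep c st ch =
      (if ch == c then st.1 + 1 else st.1, st.2 ++ [if ch == c then st.1 + 1 else st.1]) from
    fun _ _ => rfl]
  rw [inv.2]
  by_cases h : c = cur
  · simp [h]
  · have h' : ¬ cur = c := fun hh => h hh.symm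
    simp [h, h']

-- pvStepA leaves other keys' values alone
theorem pvStepA_getD_ne (cur c : Char) (d : PySem.Dict String (List Int)) (x : String)
    (h : x ≠ c.toString) : (pvStepA cur d c).getD x [] = d.getD x [] := by
  unfold pvStepA
  split <;> rw [PySem.Dict.getD_insert, if_neg h]

theorem pvStepA_keys (cur c : Char) (d : PySem.Dict String (List Int))
    (h : c.toString ∈ d.keys) : (pvStepA cur d c).keys = d.keys := by
  unfold pvStepA
  have hc : d.contains c.toString = true := (PySem.Dict.contains_iff_mem_keys d c.toString).2 h
  split <;> exact PySem.Dict.keys_insert_of_contains d _ hc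

theorem pvInner_keys (cur : Char) (ls : List Char) (d : PySem.Dict String (List Int))
    (h : ∀ c ∈ ls, c.toString ∈ d.keys) :
    (ls.foldl (pvStepA cur) d).keys = d.keys := by
  induction ls generalizing d with
  | nil => rfl
  | cons a as ih =>
    have hk := pvStepA_keys cur a d (h a (by simp))
    have := ih (pvStepA cur d a) (fun c hc => by rw [hk]; exact h c (by simp [hc]))
    simpa [hk] using this

theorem pvInner_untouched (cur : Char) (ls : List Char) (d : PySem.Dict String (List Int))
    (x : Char) (hx : x.toString ∉ ls.map Char.toString) :
    (ls.foldl (pvStepA cur) d).getD x.toString [] = d.getD x.toString [] := by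
  induction ls generalizing d with
  | nil => rfl
  | cons a as ih =>
    simp only [List.map_cons, List.mem_cons, not_or] at hx
    simp only [List.foldl_cons]
    rw [ih _ (by exact fun h => hx.2 h), pvStepA_getD_ne _ _ _ _ hx.1]

theorem pvInner_getD (cur : Char) (ls : List Char) (d : PySem.Dict String (List Int))
    (x : Char) (hx : x ∈ ls) (hnd : (ls.map Char.toString).Nodup) :
    (ls.foldl (pvStepA cur) d).getD x.toString [] =
      d.getD x.toString [] ++
        [PySem.List.pyGetD (d.getD x.toString []) (-1) 0 + if x == cur then 1 else 0] := by
  induction ls generalizing d with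
  | nil => simp at hx
  | cons a as ih =>
    simp only [List.map_cons, List.nodup_cons] at hnd
    simp only [List.foldl_cons]
    rcases List.mem_cons.1 hx with rfl | hxs
    · rw [pvInner_untouched cur as _ x hnd.1]
      unfold pvStepA
      split
      · rw [PySem.Dict.getD_insert, if_pos rfl]
      · rw [PySem.Dict.getD_insert, if_pos rfl, add_zero]
    · have hne : x.toString ≠ a.toString := by
        intro h
        exact hnd.1 (h ▸ List.mem_map_of_mem hxs)
      rw [ih _ hxs hnd.2, pvStepA_getD_ne _ _ _ _ hne]

-- A's items are the per-letter prefix-count columns, in letters order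
theorem pvMainA (L T : List Char) (hnd : L.Nodup) :
    (T.foldl (fun d cur => L.foldl (pvStepA cur) d)
        (L.foldl (fun d c => d.insert c.toString ([0] : List Int)) PySem.Dict.empty)).items
      = L.map (fun c => (c.toString, pvCol c T)) := by
  have hndm : (L.map Char.toString).Nodup := hnd.map (fun a b => pvCharToString_inj)
  have hfresh : ∀ a ∈ L, (PySem.Dict.empty : PySem.Dict String (List Int)).contains a.toString = false := by
    simp
  have hitems : (L.foldl (fun d c => d.insert c.toString ([0] : List Int)) PySem.Dict.empty).items
      = L.map (fun c => (c.toString, ([0] : List Int))) := by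
    simpa using PySem.Dict.items_foldl_insert_fresh L Char.toString (fun _ => ([0] : List Int)) PySem.Dict.empty hfresh hndm
  have hkeys0 : (L.foldl (fun d c => d.insert c.toString ([0] : List Int)) PySem.Dict.empty).keys
      = L.map Char.toString := by
    simp only [PySem.Dict.keys, hitems, List.map_map]
    rfl
  have main : ∀ t : List Char,
      (t.foldl (fun d cur => L.foldl (pvStepA cur) d)
        (L.foldl (fun d c => d.insert c.toString ([0] : List Int)) PySem.Dict.empty)).keys
          = L.map Char.toString ∧
      ∀ x ∈ L, (t.foldl (fun d cur => L.foldl (pvStepA cur) d)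
        (L.foldl (fun d c => d.insert c.toString ([0] : List Int)) PySem.Dict.empty)).getD x.toString []
          = pvCol x t := by
    intro t
    induction t using List.reverseRecOn with
    | nil =>
      refine ⟨hkeys0, fun x hx => ?_⟩
      simp only [List.foldl_nil]
      exact PySem.Dict.getD_of_mem_items _
        (by rw [hitems]; exact List.mem_map_of_mem hx)
        (by rw [hkeys0]; exact hndm) []
    | append_singleton t cur ih =>
      have hmem : ∀ c ∈ L,
          c.toString ∈ (t.foldl (fun d cur => L.foldl (pvStepA cur) d)
            (L.foldl (fun d c => d.insert c.toString ([0] : List Int)) PySem.Dict.empty)).keys := by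
        intro c hc
        rw [ih.1]
        exact List.mem_map_of_mem hc
      rw [List.foldl_append]
      simp only [List.foldl_cons, List.foldl_nil]
      refine ⟨by rw [pvInner_keys cur L _ hmem, ih.1], fun x hx => ?_⟩
      rw [pvInner_getD cur L _ x hx hndm, ih.2 x hx, pvCol_append]
  have hnk : (T.foldl (fun d cur => L.foldl (pvStepA cur) d)
      (L.foldl (fun d c => d.insert c.toString ([0] : List Int)) PySem.Dict.empty)).keys.Nodup := by
    rw [(main T).1]; exact hndm
  rw [PySem.Dict.items_eq_map_keys _ hnk [], (main T).1, List.map_map]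
  refine List.map_congr_left fun c hc => ?_
  simp only [Function.comp]
  rw [(main T).2 c hc]

-- the positions dict's entry for c is the list of indices where T has c
def pvPosD (c : Char) (T : List Char) : List Int :=
  ((PySem.List.enumerate T).filter (fun p => p.2 == c)).map (·.1)

theorem pvPositions_getD (T : List Char) (c : Char) :
    ((PySem.List.enumerate T).foldl
        (fun d p => d.modify p.2 [] (fun l => l ++ [p.1]))
        (PySem.Dict.empty : PySem.Dict Char (List Int))).getD c []
      = pvPosD c T := by
  have hsw : (PySem.List.enumerate T).foldl
      (fun d p => d.modify p.2 [] (fun l => l ++ [p.1]))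
      (PySem.Dict.empty : PySem.Dict Char (List Int))
      = ((PySem.List.enumerate T).map (fun p => (p.2, p.1))).foldl
        (fun d p => d.modify p.1 [] (fun l => l ++ [p.2])) PySem.Dict.empty := by
    rw [List.foldl_map]
  rw [hsw, PySem.Dict.getD_foldl_modify_append]
  unfold pvPosD
  simp only [List.filter_map, List.map_map]
  rfl

theorem pvPosD_bound (c : Char) (T : List Char) :
    ∀ x ∈ pvPosD c T, 0 ≤ x ∧ x < (T.length : Int) := by
  intro x hx
  unfold pvPosD at hx
  obtain ⟨p, hp, rfl⟩ := List.mem_map.1 hx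
  have hp' := List.mem_filter.1 hp
  obtain ⟨k, hk, rfl⟩ := (PySem.List.mem_enumerate_iff _ _ _).1 hp'.1
  constructor <;> simp <;> omega

theorem pvPosD_append (c : Char) (T : List Char) (cur : Char) :
    pvPosD c (T ++ [cur]) =
      pvPosD c T ++ (if cur == c then [(T.length : Int)] else []) := by
  unfold pvPosD
  rw [PySem.List.enumerate_append]
  simp only [List.filter_append, List.map_append]
  congr 1
  by_cases h : cur = c <;> simp [PySem.List.enumerate, h]

-- the running `prev` of the expansion fold is the last position (or the initial prev)
theorem pvExpand_fst (ps : List Int) (s : Int) (st : Int × List Int) :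
    ((PySem.List.enumerate ps s).foldl pvExpandStep st).1 = ps.getLast?.getD st.1 := by
  induction ps using List.reverseRecOn generalizing s st with
  | nil => simp [PySem.List.enumerate]
  | append_singleton ps p ih =>
    rw [PySem.List.enumerate_append, List.foldl_append]
    simp [PySem.List.enumerate, pvExpandStep]

theorem pvColB_snoc_ne (ps : List Int) (n : Int) (h : ps.getLast?.getD (-1) < n) :
    pvColB ps (n + 1) = pvColB ps n ++ [(ps.length : Int)] := by
  unfold pvColB
  have hfst : ((PySem.List.enumerate ps).foldl pvExpandStep (-1, [])).1
      = ps.getLast?.getD (-1) := by simpa using pvExpand_fst ps 0 (-1, [])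
  simp only [PySem.List.pyRepeat_singleton]
  rw [List.append_assoc]
  congr 1
  have h1 : (n + 1 - ((PySem.List.enumerate ps).foldl pvExpandStep (-1, [])).1).toNat
      = (n - ((PySem.List.enumerate ps).foldl pvExpandStep (-1, [])).1).toNat + 1 := by
    rw [hfst]; omega
  rw [h1, List.replicate_succ']

theorem pvColB_snoc_self (ps : List Int) (n : Int) :
    pvColB (ps ++ [n]) (n + 1) = pvColB ps n ++ [(ps.length : Int) + 1] := by
  unfold pvColB
  rw [PySem.List.enumerate_append, List.foldl_append]
  simp only [PySem.List.enumerate, List.foldl_cons, List.foldl_nil]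
  simp only [pvExpandStep, List.length_append, List.length_cons, List.length_nil]
  push_cast
  simp [PySem.List.pyRepeat_singleton, List.append_assoc]

-- main bridge: B's run-length column equals the prefix-count column
theorem pvColB_eq_pvCol (T : List Char) :
    ∀ c, pvColB (pvPosD c T) (T.length : Int) = pvCol c T ∧
      PySem.List.pyGetD (pvCol c T) (-1) 0 = ((pvPosD c T).length : Int) := by
  induction T using List.reverseRecOn with
  | nil =>
    intro c
    exact ⟨rfl, rfl⟩
  | append_singleton T cur ih =>
    intro c
    have hlen : (((T ++ [cur]).length : Nat) : Int) = (T.length : Int) + 1 := by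
      simp
    rw [pvCol_append, pvPosD_append, hlen]
    by_cases h : cur = c
    · subst h
      have hbc : (cur == cur) = true := by simp
      rw [hbc, if_pos rfl, if_pos rfl]
      refine ⟨?_, ?_⟩
      · rw [pvColB_snoc_self, (ih cur).1, (ih cur).2]
      · rw [PySem.List.pyGetD_neg_one_append_singleton, (ih cur).2]
        simp
    · have hbc : (cur == c) = false := by simp [h]
      have h2 : ¬c = cur := fun hh => h hh.symm
      have hbc' : (c == cur) = false := by simp [h2]
      rw [hbc, if_neg (by simp), hbc', if_neg (by simp), List.append_nil]
      have hlast : (pvPosD c T).getLast?.getD (-1) < (T.length : Int) := by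
        cases hps : (pvPosD c T).getLast? with
        | none => simp; omega
        | some x =>
          have hx : x ∈ pvPosD c T := List.mem_of_getLast? hps
          simpa [hps] using (pvPosD_bound c T x hx).2
      refine ⟨?_, ?_⟩
      · rw [pvColB_snoc_ne _ _ hlast, (ih c).1, (ih c).2, add_zero]
      · rw [PySem.List.pyGetD_neg_one_append_singleton, (ih c).2, add_zero]

-- B's items in closed form
theorem pvMainB (L T : List Char) (hnd : L.Nodup) :
    (L.foldl
        (fun cm c => cm.insert c.toString
          (pvColB (((PySem.List.enumerate T).foldl
              (fun d p => d.modify p.2 [] (fun l => l ++ [p.1]))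
              (PySem.Dict.empty : PySem.Dict Char (List Int))).getD c []) (T.length : Int)))
        (PySem.Dict.empty : PySem.Dict String (List Int))).items
      = L.map (fun c => (c.toString, pvCol c T)) := by
  have hndm : (L.map Char.toString).Nodup := hnd.map (fun a b => pvCharToString_inj)
  have hfresh : ∀ a ∈ L, (PySem.Dict.empty : PySem.Dict String (List Int)).contains a.toString = false := by
    simp
  rw [show (L.foldl
        (fun cm c => cm.insert c.toString
          (pvColB (((PySem.List.enumerate T).foldl
              (fun d p => d.modify p.2 [] (fun l => l ++ [p.1]))
              (PySem.Dict.empty : PySem.Dict Char (List Int))).getD c []) (T.length : Int)))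
        (PySem.Dict.empty : PySem.Dict String (List Int))).items
      = PySem.Dict.empty.items ++ L.map (fun c => (c.toString,
          pvColB (((PySem.List.enumerate T).foldl
              (fun d p => d.modify p.2 [] (fun l => l ++ [p.1]))
              (PySem.Dict.empty : PySem.Dict Char (List Int))).getD c []) (T.length : Int)))
    from PySem.Dict.items_foldl_insert_fresh L Char.toString _ PySem.Dict.empty hfresh hndm]
  rw [show (PySem.Dict.empty : PySem.Dict String (List Int)).items = [] from rfl,
    List.nil_append]
  refine List.map_congr_left fun c _ => ?_
  rw [pvPositions_getD, (pvColB_eq_pvCol T c).1]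

-- ===== VERDICT (by name: the statement is the Claim_ definition above) =====
theorem build_count_matrix_spec : Claim_equal_build_count_matrix := by
  intro letters last_column _ hpre
  unfold Spec_build_count_matrix build_count_matrix build_count_matrix_alt
  rw [pvMainA letters.toList last_column.toList hpre,
    pvMainB letters.toList last_column.toList hpre]
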